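-- pv_equiv track=rewrite | github.com/FZ1977/Python | sort_by_vocals.py | Consonanti
-- ===== SOURCE A (Python) =====
-- def Consonanti(a):
--     c = ('b','c','d','f','g','h','j','k','l','m','n','p','q','r','s','t','v','w','x','y','z')
--     C = ('B','C','D','F','G','H','J','K','L','M','N','P','Q','R','S','T','V','W','X','Y','Z')
--     consonanti = []
--
--     for i in a:
--         if(i in c or i in C):
--             consonanti.append(i)
--
--     for j in range(len(consonanti)-1):
--         for z in range(j+1,len(consonanti)):
--             if(consonanti[j] > consonanti[z]):
--                 temp = consonanti[j]
--                 consonanti[j] = consonanti[z]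
--                 consonanti[z] = temp
--
--     return consonanti
-- ===== SOURCE B (Python) =====
-- def Consonanti(a):
--     # Counting sort: tally each consonant, then emit in ascending character-code
--     # order (uppercase consonants before lowercase), each repeated its count.
--     cons = ('B','C','D','F','G','H','J','K','L','M','N','P','Q','R','S','T','V','W','X','Y','Z',
--             'b','c','d','f','g','h','j','k','l','m','n','p','q','r','s','t','v','w','x','y','z')
--     counts = {}
--     for ch in a:
--         if ch in cons:
--             counts[ch] = counts.get(ch, 0) + 1
--     out = []
--     for ch in cons:
--         out.extend([ch] * counts.get(ch, 0))
--     return out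
-- ===== Notes on version B (the rewrite author's own statement) =====
-- stated objective: faster
-- what changed: Replaced the quadratic compare-and-swap exchange sort over the extracted consonants with a counting sort: one pass tallies each consonant in a dict, then the result is emitted by walking the 42 consonant letters in ascending character-code order, repeating each by its count.
import Mathlib
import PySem

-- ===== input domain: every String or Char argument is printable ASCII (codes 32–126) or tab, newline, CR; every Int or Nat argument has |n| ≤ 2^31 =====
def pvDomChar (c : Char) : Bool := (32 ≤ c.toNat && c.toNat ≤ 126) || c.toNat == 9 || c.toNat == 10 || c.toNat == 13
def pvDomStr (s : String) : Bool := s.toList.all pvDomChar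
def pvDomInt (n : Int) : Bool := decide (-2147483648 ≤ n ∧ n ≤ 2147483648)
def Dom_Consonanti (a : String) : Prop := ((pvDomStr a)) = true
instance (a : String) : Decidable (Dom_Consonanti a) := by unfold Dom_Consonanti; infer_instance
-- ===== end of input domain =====

-- B replaces A's quadratic compare-and-swap exchange sort with a counting sort:
-- tally each consonant, then emit the 42 consonant letters in ascending code order.

-- shared conversion: iterating a Python string yields one-character strings
def pvChStr (i : Char) : String := String.ofList [i]

-- ===== PORT A =====
def pvLow : List String := ["b","c","d","f","g","h","j","k","l","m","n","p","q","r","s","t","v","w","x","y","z"]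
def pvUp : List String := ["B","C","D","F","G","H","J","K","L","M","N","P","Q","R","S","T","V","W","X","Y","Z"]

def Consonanti (a : String) : List String :=
  let consonanti := a.toList.foldl
    (fun acc i => if pvChStr i ∈ pvLow ∨ pvChStr i ∈ pvUp then acc ++ [pvChStr i] else acc) []
  -- nested index loops; Python string comparison s1 > s2 is '<' on the code-point lists (exact)
  (PySem.List.pyRange 0 ((consonanti.length : Int) - 1) 1).foldl
    (fun l j =>
      (PySem.List.pyRange (j + 1) ((l.length : Int)) 1).foldl
        (fun l z =>
          if (PySem.List.pyGetD l z "").toList < (PySem.List.pyGetD l j "").toList then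
            let temp := PySem.List.pyGetD l j ""
            let l' := PySem.List.pySetD l j (PySem.List.pyGetD l z "")
            PySem.List.pySetD l' z temp
          else l) l) consonanti

-- ===== PORT B =====
def pvConsAsc : List String :=
  ["B","C","D","F","G","H","J","K","L","M","N","P","Q","R","S","T","V","W","X","Y","Z",
   "b","c","d","f","g","h","j","k","l","m","n","p","q","r","s","t","v","w","x","y","z"]

def Consonanti_alt (a : String) : List String :=
  let counts : PySem.Dict String Int := a.toList.foldl
    (fun d ch => if pvChStr ch ∈ pvConsAsc then d.modify (pvChStr ch) 0 (· + 1) else d)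
    PySem.Dict.empty
  pvConsAsc.foldl (fun out ch => out ++ PySem.List.pyRepeat [ch] (counts.getD ch 0)) []

-- ===== PRECONDITION & SPEC =====
def Spec_Consonanti (a : String) (out : List String) : Prop := out = Consonanti_alt a
instance (a : String) (out : List String) : Decidable (Spec_Consonanti a out) := by unfold Spec_Consonanti; infer_instance

-- ===== CLAIM (what is proved, stated in full; the proofs are below) =====
def Claim_equal_Consonanti : Prop := ∀ (a : String), Dom_Consonanti a → Spec_Consonanti a (Consonanti a)

-- ===== LEMMAS AND PROOFS =====

-- functional mirror of A's mutated-list loops, on Nat indices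
def pvStep (j : Nat) (l : List String) (z : Nat) : List String :=
  if (l.getD z "").toList < (l.getD j "").toList then (l.set j (l.getD z "")).set z (l.getD j "") else l

def pvInner (j : Nat) (l : List String) (zs : List Nat) : List String := zs.foldl (pvStep j) l

def pvOuter (l : List String) (js : List Nat) : List String :=
  js.foldl (fun l j => pvInner j l (List.range' (j + 1) (l.length - (j + 1)))) l

-- the consonants of a, in order, as one-character strings
def pvFilt (a : String) : List String := (a.toList.map pvChStr).filter (· ∈ pvConsAsc)

-- B's counting-sort output shape
def pvOut (l : List String) : List String := pvConsAsc.flatMap (fun ch => List.replicate (l.count ch) ch)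

-- string comparison used throughout: code-point order via toList
def pvLe (s t : String) : Prop := s.toList ≤ t.toList

lemma pv_perm_lowup : List.Perm (pvLow ++ pvUp) pvConsAsc := by decide

lemma pv_mem_iff (s : String) : (s ∈ pvLow ∨ s ∈ pvUp) ↔ s ∈ pvConsAsc := by
  rw [← List.mem_append]
  exact pv_perm_lowup.mem_iff

lemma pvConsAsc_nodup : pvConsAsc.Nodup := by decide

lemma pvConsAsc_pairwise : pvConsAsc.Pairwise (fun s t => s.toList < t.toList) := by decide

-- generic bridge: a fold over pyRange a b 1 is a fold over range' a (b-a)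
lemma pv_foldl_pyRange {β : Type} (f : β → Int → β) (g : β → Nat → β) (a b : Nat) (init : β)
    (h : ∀ acc k, f acc ((a + k : Nat) : Int) = g acc (a + k)) :
    (PySem.List.pyRange a b 1).foldl f init = (List.range' a (b - a)).foldl g init := by
  rw [PySem.List.pyRange_one, List.foldl_map, List.range'_eq_map_range, List.foldl_map]
  have hn : ((b : Int) - (a : Int)).toNat = b - a := by omega
  rw [hn]
  apply PySem.List.foldl_congr_mem
  intro acc x _
  have hx : (a : Int) + (x : Int) = ((a + x : Nat) : Int) := by push_cast; ring
  rw [hx, h]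

-- A's port equals the Nat-index mirror on the filtered list
lemma pv_A_eq (a : String) :
    Consonanti a = pvOuter (pvFilt a) (List.range' 0 ((pvFilt a).length - 1)) := by
  have hfilt : (a.toList.foldl
      (fun acc i => if pvChStr i ∈ pvLow ∨ pvChStr i ∈ pvUp then acc ++ [pvChStr i] else acc)
      ([] : List String)) = pvFilt a := by
    rw [PySem.List.foldl_append_ite, pvFilt, List.filter_map, List.nil_append]
    congr 1
    apply List.filter_congr
    intro x _
    simp [Function.comp, pv_mem_iff (pvChStr x)]
  simp only [Consonanti, hfilt]
  rcases hL : (pvFilt a).length with _ | n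
  · rw [PySem.List.pyRange_one_eq_nil (by norm_num)]
    simp [pvOuter]
  · have hcast : (((n + 1 : Nat)) : Int) - 1 = ((n : Nat) : Int) := by push_cast; ring
    rw [hcast, show (0 : Int) = ((0 : Nat) : Int) from rfl,
      pv_foldl_pyRange _ (fun l j => pvInner j l (List.range' (j + 1) (l.length - (j + 1))))
      0 n, Nat.sub_zero, pvOuter, Nat.add_sub_cancel]
    intro acc m
    have h1 : (((0 + m : Nat) : Int)) + 1 = (((0 + m + 1 : Nat)) : Int) := by push_cast; ring
    have hstep : ∀ (l : List String) (k : Nat),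
        (fun (l : List String) (z : Int) =>
          if (PySem.List.pyGetD l z "").toList < (PySem.List.pyGetD l ((0 + m : Nat) : Int) "").toList then
            PySem.List.pySetD (PySem.List.pySetD l ((0 + m : Nat) : Int) (PySem.List.pyGetD l z ""))
              z (PySem.List.pyGetD l ((0 + m : Nat) : Int) "")
          else l) l (((0 + m + 1) + k : Nat) : Int) = pvStep (0 + m) l ((0 + m + 1) + k) := by
      intro l k
      simp only [pvStep, PySem.List.pyGetD_natCast, PySem.List.pySetD_natCast]
    exact pv_foldl_pyRange _ (pvStep (0 + m)) (0 + m + 1) acc.length acc hstep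

-- B's port equals the counting-sort shape on the filtered list
lemma pv_B_eq (a : String) : Consonanti_alt a = pvOut (pvFilt a) := by
  have hcnt : a.toList.foldl
      (fun d ch => if pvChStr ch ∈ pvConsAsc then d.modify (pvChStr ch) 0 (· + 1) else d)
      PySem.Dict.empty = PySem.Dict.counter (pvFilt a) := by
    rw [PySem.List.foldl_ite_eq_foldl_filter (p := fun ch => pvChStr ch ∈ pvConsAsc),
      PySem.Dict.counter_eq_foldl, pvFilt, List.filter_map, List.foldl_map]
    rfl
  simp only [Consonanti_alt, hcnt]
  rw [PySem.List.foldl_append_eq_flatMap, List.nil_append, pvOut]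
  congr 1
  funext ch
  rw [PySem.List.pyRepeat_singleton, PySem.Dict.getD_counter]
  simp

-- --- exchange-sort correctness ---

lemma pv_swap_perm (t : List String) (i : Nat) (b : String) (h : i < t.length) :
    List.Perm (t.getD i "" :: t.set i b) (b :: t) := by
  induction t generalizing i with
  | nil => simp at h
  | cons x t ih =>
    cases i with
    | zero => simpa using List.Perm.swap b x t
    | succ i =>
      have := ih i (by simpa using h)
      refine List.Perm.trans (l₂ := x :: t.getD i "" :: t.set i b) ?_ ?_
      · simpa using List.Perm.swap x (t.getD i "") (t.set i b)
      · exact List.Perm.trans (List.Perm.cons x this) (List.Perm.swap b x t)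

lemma pv_step_length (j : Nat) (l : List String) (z : Nat) : (pvStep j l z).length = l.length := by
  unfold pvStep; split <;> simp

lemma pv_step_getD_ne (j : Nat) (l : List String) (z k : Nat) (hj : k ≠ j) (hz : k ≠ z) :
    (pvStep j l z).getD k "" = l.getD k "" := by
  unfold pvStep; split
  · simp [List.getD_eq_getElem?_getD, hj.symm, hz.symm]
  · rfl

lemma pv_getD_set_self (l : List String) (j : Nat) (v : String) (h : j < l.length) :
    (l.set j v).getD j "" = v := by
  simp [List.getD_eq_getElem?_getD, h]

lemma pv_getD_set_ne (l : List String) (j k : Nat) (v : String) (h : j ≠ k) :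
    (l.set j v).getD k "" = l.getD k "" := by
  simp [List.getD_eq_getElem?_getD, h]

lemma pv_step_drop_perm (j : Nat) (l : List String) (z : Nat) (hjz : j < z) (hzl : z < l.length) :
    List.Perm ((pvStep j l z).drop j) (l.drop j) := by
  unfold pvStep
  split
  · rw [List.drop_set, List.drop_set, if_neg (by omega), if_neg (by omega), Nat.sub_self]
    have ht : l.drop j = l.getD j "" :: l.drop (j + 1) := by
      rw [List.getD_eq_getElem _ _ (by omega), List.drop_eq_getElem_cons (by omega)]
    rw [ht]
    have hz1 : z - j = (z - (j + 1)) + 1 := by omega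
    rw [hz1]
    simp only [List.set_cons_zero, List.set_cons_succ]
    have hb : l.getD z "" = (l.drop (j + 1)).getD (z - (j + 1)) "" := by
      have hlt : z - (j + 1) < (l.drop (j + 1)).length := by simp; omega
      rw [List.getD_eq_getElem _ _ (by omega), List.getD_eq_getElem _ _ hlt, List.getElem_drop]
      congr 1; omega
    rw [hb]
    exact pv_swap_perm (l.drop (j + 1)) (z - (j + 1)) (l.getD j "") (by simp; omega)
  · exact List.Perm.refl _

lemma pv_step_j_le (j : Nat) (l : List String) (z : Nat) (hjz : j < z) (hzl : z < l.length) :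
    pvLe ((pvStep j l z).getD j "") (l.getD j "") := by
  unfold pvStep
  split
  · rw [pv_getD_set_ne _ _ _ _ (by omega), pv_getD_set_self _ _ _ (by omega)]
    exact le_of_lt ‹_›
  · exact le_refl _

lemma pv_step_j_le_z (j : Nat) (l : List String) (z : Nat) (hjz : j < z) (hzl : z < l.length) :
    pvLe ((pvStep j l z).getD j "") ((pvStep j l z).getD z "") := by
  unfold pvStep
  split
  · rw [pv_getD_set_ne _ _ _ _ (by omega), pv_getD_set_self _ _ _ (by omega),
      pv_getD_set_self _ _ _ (by simpa using hzl)]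
    exact le_of_lt ‹_›
  · exact not_lt.mp ‹_›

lemma pv_getD_mem_drop (l : List String) (j k : Nat) (hjk : j ≤ k) (hk : k < l.length) :
    l.getD k "" ∈ l.drop j := by
  have h1 : k - j < (l.drop j).length := by simp; omega
  have h2 : (l.drop j)[k - j]'h1 = l[k]'hk := by rw [List.getElem_drop]; congr 1; omega
  rw [List.getD_eq_getElem _ _ hk, ← h2]
  exact List.getElem_mem h1

lemma pv_inner_spec (j : Nat) : ∀ (m z0 : Nat) (l : List String), j < z0 → z0 + m = l.length →
    (∀ k, j < k → k < z0 → pvLe (l.getD j "") (l.getD k "")) →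
    (pvInner j l (List.range' z0 m)).length = l.length ∧
    (∀ k, k < j → (pvInner j l (List.range' z0 m)).getD k "" = l.getD k "") ∧
    List.Perm ((pvInner j l (List.range' z0 m)).drop j) (l.drop j) ∧
    (∀ k, j < k → k < l.length →
      pvLe ((pvInner j l (List.range' z0 m)).getD j "") ((pvInner j l (List.range' z0 m)).getD k "")) := by
  intro m
  induction m with
  | zero =>
    intro z0 l hjz hlen inv
    refine ⟨rfl, fun _ _ => rfl, List.Perm.refl _, ?_⟩
    intro k hk1 hk2
    exact inv k hk1 (by omega)
  | succ m ih =>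
    intro z0 l hjz hlen inv
    have hz0l : z0 < l.length := by omega
    rw [List.range'_succ]
    have hfold : pvInner j l (z0 :: List.range' (z0 + 1) m)
        = pvInner j (pvStep j l z0) (List.range' (z0 + 1) m) := rfl
    set l1 := pvStep j l z0 with hl1
    have len1 : l1.length = l.length := pv_step_length j l z0
    have inv1 : ∀ k, j < k → k < z0 + 1 → pvLe (l1.getD j "") (l1.getD k "") := by
      intro k hk1 hk2
      by_cases hk : k = z0
      · rw [hk]
        exact pv_step_j_le_z j l z0 hjz hz0l
      · have hkz : k < z0 := by omega
        rw [pv_step_getD_ne j l z0 k (by omega) hk]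
        exact le_trans (pv_step_j_le j l z0 hjz hz0l) (inv k hk1 hkz)
    obtain ⟨L1, P1, D1, S1⟩ := ih (z0 + 1) l1 (by omega) (by omega) inv1
    rw [hfold]
    refine ⟨L1.trans len1, ?_, D1.trans (pv_step_drop_perm j l z0 hjz hz0l), ?_⟩
    · intro k hk
      rw [P1 k hk]
      exact pv_step_getD_ne j l z0 k (by omega) (by omega)
    · intro k hk1 hk2
      exact S1 k hk1 (by omega)

lemma pv_perm_of_parts (l l' : List String) (j : Nat) (hlen : l'.length = l.length)
    (hpre : ∀ k, k < j → l'.getD k "" = l.getD k "") (hdrop : List.Perm (l'.drop j) (l.drop j)) :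
    List.Perm l' l := by
  have ht : l'.take j = l.take j := by
    apply List.ext_getElem (by simp [hlen])
    intro i h1 h2
    have hi : i < j := by simp at h1; omega
    have hi1 : i < l'.length := by simp at h1; omega
    have hi2 : i < l.length := by simp at h2; omega
    rw [List.getElem_take, List.getElem_take]
    have := hpre i hi
    rwa [List.getD_eq_getElem _ _ hi1, List.getD_eq_getElem _ _ hi2] at this
  conv_lhs => rw [← List.take_append_drop j l']
  conv_rhs => rw [← List.take_append_drop j l]
  rw [ht]
  exact List.Perm.append_left _ hdrop

lemma pv_outer_spec : ∀ (m j0 : Nat) (l : List String), j0 + m + 1 = l.length →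
    (∀ i k, i < j0 → i < k → k < l.length → pvLe (l.getD i "") (l.getD k "")) →
    (pvOuter l (List.range' j0 m)).length = l.length ∧
    List.Perm (pvOuter l (List.range' j0 m)) l ∧
    (∀ i k, i < j0 + m → i < k → k < l.length →
      pvLe ((pvOuter l (List.range' j0 m)).getD i "") ((pvOuter l (List.range' j0 m)).getD k "")) := by
  intro m
  induction m with
  | zero =>
    intro j0 l hlen inv
    exact ⟨rfl, List.Perm.refl _, fun i k hi hik hk => inv i k (by omega) hik hk⟩
  | succ m ih =>
    intro j0 l hlen inv
    rw [List.range'_succ]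
    obtain ⟨ilen, ipre, idrop, isort⟩ :=
      pv_inner_spec j0 (l.length - (j0 + 1)) (j0 + 1) l (by omega) (by omega) (by omega)
    set l1 := pvInner j0 l (List.range' (j0 + 1) (l.length - (j0 + 1))) with hl1
    have hfold : pvOuter l (j0 :: List.range' (j0 + 1) m) = pvOuter l1 (List.range' (j0 + 1) m) := rfl
    have inv1 : ∀ i k, i < j0 + 1 → i < k → k < l1.length → pvLe (l1.getD i "") (l1.getD k "") := by
      intro i k hi hik hk
      rw [ilen] at hk
      by_cases hij : i = j0
      · subst hij
        exact isort k hik hk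
      · have hi' : i < j0 := by omega
        rw [ipre i hi']
        by_cases hkj : k < j0
        · rw [ipre k hkj]
          exact inv i k hi' hik hk
        · have hmem : l1.getD k "" ∈ l1.drop j0 :=
            pv_getD_mem_drop l1 j0 k (by omega) (by rw [ilen]; exact hk)
          have hmem' : l1.getD k "" ∈ l.drop j0 := idrop.mem_iff.1 hmem
          obtain ⟨idx, hidx, heq⟩ := List.mem_iff_getElem.1 hmem'
          have hb : j0 + idx < l.length := by simp at hidx; omega
          have h2 : l.getD (j0 + idx) "" = l1.getD k "" := by
            rw [List.getD_eq_getElem _ _ hb, ← heq, List.getElem_drop]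
          rw [← h2]
          exact inv i (j0 + idx) hi' (by omega) hb
    obtain ⟨L, P, I⟩ := ih (j0 + 1) l1 (by omega) inv1
    have hperm1 : List.Perm l1 l := pv_perm_of_parts l l1 j0 ilen ipre idrop
    rw [hfold]
    refine ⟨L.trans ilen, P.trans hperm1, ?_⟩
    intro i k hi hik hk
    exact I i k (by omega) hik (by omega)

lemma pv_sorted_outer (l : List String) :
    (pvOuter l (List.range' 0 (l.length - 1))).Pairwise pvLe ∧
    List.Perm (pvOuter l (List.range' 0 (l.length - 1))) l := by
  rcases hn : l.length with _ | n
  · have : l = [] := List.length_eq_zero_iff.1 hn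
    subst this
    simp [pvOuter]
  · have h1 : l.length - 1 = n := by omega
    obtain ⟨L, P, I⟩ := pv_outer_spec n 0 l (by omega)
      (by intro i k hi _ _; exact absurd hi (by omega))
    simp only [Nat.add_sub_cancel]
    refine ⟨?_, P⟩
    apply List.pairwise_iff_getElem.2
    intro i k hi hk hik
    have hkl : k < l.length := by rw [← L]; exact hk
    have hil : i < (pvOuter l (List.range' 0 n)).length := hi
    have := I i k (by omega) hik hkl
    rwa [List.getD_eq_getElem _ _ hi, List.getD_eq_getElem _ _ hk] at this

-- --- counting-sort output: permutation and sortedness ---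

lemma pv_count_flatMap : ∀ (K : List String), K.Nodup → ∀ (f : String → Nat) (x : String),
    (K.flatMap fun ch => List.replicate (f ch) ch).count x = if x ∈ K then f x else 0 := by
  intro K
  induction K with
  | nil => simp
  | cons c K ih =>
    intro hK f x
    rw [List.nodup_cons] at hK
    obtain ⟨hc, hK'⟩ := hK
    simp only [List.flatMap_cons, List.count_append, List.count_replicate, List.mem_cons,
      ih hK' f x]
    by_cases hx : x = c
    · subst hx
      simp [hc]
    · simp [hx, Ne.symm hx, beq_iff_eq]

lemma pv_out_perm (l : List String) (hl : ∀ x ∈ l, x ∈ pvConsAsc) : List.Perm (pvOut l) l := by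
  rw [List.perm_iff_count]
  intro x
  rw [pvOut, pv_count_flatMap _ pvConsAsc_nodup]
  by_cases hx : x ∈ pvConsAsc
  · simp [hx]
  · simp [hx, List.count_eq_zero_of_not_mem (fun h => hx (hl x h))]

lemma pv_flat_sorted : ∀ (K : List String), K.Pairwise (fun s t => s.toList < t.toList) →
    ∀ (f : String → Nat), (K.flatMap fun ch => List.replicate (f ch) ch).Pairwise pvLe := by
  intro K
  induction K with
  | nil => intro _ f; simp
  | cons c K ih =>
    intro hK f
    rw [List.pairwise_cons] at hK
    obtain ⟨hc, hK'⟩ := hK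
    simp only [List.flatMap_cons, List.pairwise_append]
    refine ⟨List.pairwise_replicate.2 (Or.inr (le_refl c.toList)), ih hK' f, ?_⟩
    intro x hx y hy
    have hxc : x = c := List.eq_of_mem_replicate hx
    obtain ⟨c', hc', hy'⟩ := List.mem_flatMap.1 hy
    have hyc : y = c' := List.eq_of_mem_replicate hy'
    have hlt : c.toList < c'.toList := hc c' hc'
    rw [pvLe, hxc, hyc]
    exact le_of_lt hlt

lemma pv_out_sorted (l : List String) : (pvOut l).Pairwise pvLe :=
  pv_flat_sorted pvConsAsc pvConsAsc_pairwise _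

lemma pv_main (l : List String) (hl : ∀ x ∈ l, x ∈ pvConsAsc) :
    pvOuter l (List.range' 0 (l.length - 1)) = pvOut l := by
  obtain ⟨hs, hp⟩ := pv_sorted_outer l
  have hperm : List.Perm (pvOuter l (List.range' 0 (l.length - 1))) (pvOut l) :=
    hp.trans (pv_out_perm l hl).symm
  refine hperm.eq_of_pairwise ?_ hs (pv_out_sorted l)
  intro s t _ _ h1 h2
  exact String.toList_inj.1 (le_antisymm h1 h2)

lemma pv_filt_mem (a : String) : ∀ x ∈ pvFilt a, x ∈ pvConsAsc := by
  intro x hx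
  have := List.of_mem_filter hx
  simpa using this

-- ===== VERDICT (by name: the statement is the Claim_ definition above) =====
theorem Consonanti_spec : Claim_equal_Consonanti := by
  intro a _
  show Consonanti a = Consonanti_alt a
  rw [pv_A_eq, pv_B_eq, pv_main (pvFilt a) (pv_filt_mem a)]
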